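-- pv_equiv track=rewrite | github.com/dolonet/wagstaff-chebyshev | scripts/split_factor_census.py | V_mod
-- ===== SOURCE A (Python) =====
-- def V_mod(n, m):
--     """Compute Pell V_n mod m via trace of matrix power."""
--     if m == 1:
--         return 0
--     if n == 0:
--         return 2 % m
--     def mm(A, B):
--         return [[(A[0][0]*B[0][0]+A[0][1]*B[1][0]) % m,
--                  (A[0][0]*B[0][1]+A[0][1]*B[1][1]) % m],
--                 [(A[1][0]*B[0][0]+A[1][1]*B[1][0]) % m,
--                  (A[1][0]*B[0][1]+A[1][1]*B[1][1]) % m]]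
--     R = [[1, 0], [0, 1]]
--     B = [[2, 1], [1, 0]]
--     e = n
--     while e > 0:
--         if e & 1:
--             R = mm(R, B)
--         B = mm(B, B)
--         e >>= 1
--     return (R[0][0] + R[1][1]) % m
-- ===== SOURCE B (Python) =====
-- def V_mod(n, m):
--     """Pell V_n mod m via Lucas fast doubling on the scalar pair (V_k, V_{k+1})."""
--     if m == 1:
--         return 0
--     if n <= 0:
--         return 2 % m
--     bits = []
--     k = n
--     while k:
--         bits.append(k & 1)
--         k >>= 1
--     a, b, s = 2 % m, 2 % m, 1   # (V_0 mod m, V_1 mod m, (-1)**0)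
--     for d in reversed(bits):
--         if d == 0:
--             a, b, s = (a * a - 2 * s) % m, (a * b - 2 * s) % m, 1
--         else:
--             a, b, s = (a * b - 2 * s) % m, (b * b + 2 * s) % m, -1
--     return a
-- ===== Notes on version B (the rewrite author's own statement) =====
-- stated objective: alternative
-- what changed: Replaces the 2x2 matrix binary-exponentiation loop (8 multiplications and 4 reductions per step on a 4-entry matrix) by Lucas-sequence fast doubling that maintains only the two scalars (V_k, V_{k+1}) and the sign (-1)^k over the bits of n, most significant first.
-- outside the precondition, e.g. on V_mod(3, 0): A raises ZeroDivisionError, B raises ZeroDivisionError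
import Mathlib
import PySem

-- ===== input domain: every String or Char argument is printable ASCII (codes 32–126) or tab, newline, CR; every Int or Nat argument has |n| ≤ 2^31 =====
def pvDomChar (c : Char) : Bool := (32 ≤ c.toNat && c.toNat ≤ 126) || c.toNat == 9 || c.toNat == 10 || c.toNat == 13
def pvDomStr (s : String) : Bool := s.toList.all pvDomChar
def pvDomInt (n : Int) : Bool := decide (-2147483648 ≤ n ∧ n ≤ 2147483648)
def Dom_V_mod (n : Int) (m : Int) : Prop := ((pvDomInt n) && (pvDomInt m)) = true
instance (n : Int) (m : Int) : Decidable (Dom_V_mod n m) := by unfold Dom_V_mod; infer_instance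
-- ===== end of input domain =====

-- B replaces A's 2x2 matrix-power loop by Lucas-sequence fast doubling on the two scalars (V_k, V_{k+1}); alternative decomposition, same O(log n) cost.

-- ===== PORT A =====
-- A's inner helper mm: 2x2 matrices as pairs of pairs, every entry reduced with Python's %.
def pvMM (m : Int) (A B : (Int × Int) × (Int × Int)) : (Int × Int) × (Int × Int) :=
  ((PySem.Int.mod (A.1.1 * B.1.1 + A.1.2 * B.2.1) m, PySem.Int.mod (A.1.1 * B.1.2 + A.1.2 * B.2.2) m),
   (PySem.Int.mod (A.2.1 * B.1.1 + A.2.2 * B.2.1) m, PySem.Int.mod (A.2.1 * B.1.2 + A.2.2 * B.2.2) m))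

-- A's `while e > 0` loop; e > 0 so it is recursion on the Nat e, e >>= 1 is e / 2.
def pvALoop (m : Int) : Nat → ((Int × Int) × (Int × Int)) → ((Int × Int) × (Int × Int)) → ((Int × Int) × (Int × Int))
  | 0, R, _ => R
  | (e+1), R, B =>
      pvALoop m ((e+1) / 2) (if (e+1) % 2 = 1 then pvMM m R B else R) (pvMM m B B)
  termination_by e _ _ => e
  decreasing_by omega

def V_mod (n : Int) (m : Int) : Int :=
  if m = 1 then 0
  else if n = 0 then PySem.Int.mod 2 m
  else
    -- for n < 0 the while loop runs zero times (toNat = 0), exactly as in Python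
    let R := pvALoop m n.toNat ((1, 0), (0, 1)) ((2, 1), (1, 0))
    PySem.Int.mod (R.1.1 + R.2.2) m

-- ===== PORT B =====
-- Source B's first while loop: the bits of k, least significant first.
def pvBits : Nat → List Nat
  | 0 => []
  | (k+1) => ((k+1) % 2) :: pvBits ((k+1) / 2)
  termination_by k => k
  decreasing_by omega

-- Source B's loop body over state (a, b, s).
def pvBStep (m : Int) (st : Int × Int × Int) (d : Nat) : Int × Int × Int :=
  if d = 0 then
    (PySem.Int.mod (st.1 * st.1 - 2 * st.2.2) m, PySem.Int.mod (st.1 * st.2.1 - 2 * st.2.2) m, 1)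
  else
    (PySem.Int.mod (st.1 * st.2.1 - 2 * st.2.2) m, PySem.Int.mod (st.2.1 * st.2.1 + 2 * st.2.2) m, -1)

def V_mod_alt (n : Int) (m : Int) : Int :=
  if m = 1 then 0
  else if n ≤ 0 then PySem.Int.mod 2 m
  else ((pvBits n.toNat).reverse.foldl (pvBStep m) (PySem.Int.mod 2 m, PySem.Int.mod 2 m, 1)).1

-- ===== PRECONDITION & SPEC =====
-- Pre_ excludes only m = 0, where Python's `%` raises ZeroDivisionError in both A and B.
def Pre_V_mod (n : Int) (m : Int) : Prop := m ≠ 0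
instance (n : Int) (m : Int) : Decidable (Pre_V_mod n m) := by unfold Pre_V_mod; infer_instance
def pvWitness_V_mod : Int × Int := (5, 7)

def Spec_V_mod (n : Int) (m : Int) (out : Int) : Prop := out = V_mod_alt n m
instance (n : Int) (m : Int) (out : Int) : Decidable (Spec_V_mod n m out) := by unfold Spec_V_mod; infer_instance

-- ===== CLAIM (what is proved, stated in full; the proofs are below) =====
def Claim_equal_V_mod : Prop := ∀ (n : Int) (m : Int), Dom_V_mod n m → Pre_V_mod n m → Spec_V_mod n m (V_mod n m)

-- ===== LEMMAS AND PROOFS =====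

-- Pell U-sequence: U 0 = 0, U 1 = 1, U (k+2) = 2 U (k+1) + U k.
def pvU : Nat → Int
  | 0 => 0
  | 1 => 1
  | (k+2) => 2 * pvU (k+1) + pvU k

-- Pell V-sequence, expressed through U: V k = 2 U (k+1) - 2 U k.
def pvV (k : Nat) : Int := 2 * pvU (k+1) - 2 * pvU k

lemma pvU_two_step (k : Nat) : pvU (k+2) = 2 * pvU (k+1) + pvU k := by
  simp [pvU]

-- addition formula, shifted to stay in Nat
lemma pvU_add : ∀ b a : Nat, pvU (a+1+b) = pvU (a+1) * pvU (b+1) + pvU a * pvU b := by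
  intro b
  induction b using Nat.strong_induction_on with
  | _ b ih =>
    match b with
    | 0 => intro a; simp [pvU]
    | 1 => intro a; rw [show a+1+1 = a+2 by omega, pvU_two_step]; simp [pvU]; ring
    | (b+2) =>
      intro a
      have h1 := ih b (by omega) a
      have h2 := ih (b+1) (by omega) a
      have e1 : pvU (b+2) = 2 * pvU (b+1) + pvU b := pvU_two_step b
      have e2 : pvU (b+3) = 2 * pvU (b+2) + pvU (b+1) := by
        have := pvU_two_step (b+1)
        rwa [show b+1+2 = b+3 by omega, show b+1+1 = b+2 by omega] at this
      rw [show a+1+(b+2) = (a+1+b)+2 by omega, pvU_two_step,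
          show a+1+b+1 = a+1+(b+1) by omega, h2, h1,
          show b+1+1 = b+2 by omega, show b+2+1 = b+3 by omega, e2, e1]
      ring

lemma pvU_add2 (j k : Nat) :
    pvU (j+k) = pvU (j+1) * pvU k + pvU j * pvU (k+1) - 2 * pvU j * pvU k := by
  cases k with
  | zero => simp [pvU]
  | succ k =>
    have h := pvU_add k j
    rw [show j+(k+1) = j+1+k by omega, h, pvU_two_step k]
    ring

-- Cassini-style identity giving the sign (-1)^k
lemma pvCassini : ∀ k : Nat, pvU (k+1) * pvU (k+1) - 2 * pvU k * pvU (k+1) - pvU k * pvU k = (-1)^k := by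
  intro k
  induction k with
  | zero => simp [pvU]
  | succ k ih =>
    rw [pvU_two_step, pow_succ]
    linear_combination (-1 : Int) * ih

lemma pvU_dbl1 (k : Nat) : pvU (2*k+1) = pvU (k+1) * pvU (k+1) + pvU k * pvU k := by
  have h := pvU_add k k
  rwa [show k+1+k = 2*k+1 by omega] at h

lemma pvU_dbl2 (k : Nat) : pvU (2*k+2) = 2 * pvU (k+1) * pvU (k+1) + 2 * pvU k * pvU (k+1) := by
  have h := pvU_add k (k+1)
  rw [show k+1+1+k = 2*k+2 by omega, show k+1+1 = k+2 by omega, pvU_two_step k] at h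
  rw [h]; ring

lemma pvU_dbl0 (k : Nat) : pvU (2*k) = 2 * pvU k * pvU (k+1) - 2 * pvU k * pvU k := by
  have h0 := pvU_two_step (2*k)
  have h1 := pvU_dbl1 k
  have h2 := pvU_dbl2 k
  linarith

lemma pvV_double (k : Nat) : pvV (2*k) = pvV k * pvV k - 2 * (-1 : Int)^k := by
  have hB := pvU_dbl1 k
  have hA := pvU_dbl0 k
  have hc := pvCassini k
  unfold pvV
  rw [hB, hA]
  linear_combination -2*hc

lemma pvV_double1 (k : Nat) : pvV (2*k+1) = pvV k * pvV (k+1) - 2 * (-1 : Int)^k := by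
  have hB := pvU_dbl1 k
  have hC := pvU_dbl2 k
  have hc := pvCassini k
  unfold pvV
  rw [show 2*k+1+1 = 2*k+2 by omega, show k+1+1 = k+2 by omega, hB, hC, pvU_two_step k]
  linear_combination -2*hc

lemma pvV_double2 (k : Nat) : pvV (2*k+2) = pvV (k+1) * pvV (k+1) + 2 * (-1 : Int)^k := by
  have h := pvV_double (k+1)
  rw [show 2*(k+1) = 2*k+2 by omega] at h
  rw [h, pow_succ]
  ring

-- Python % respects congruence mod m (fmod is constant on residue classes; also true for m = 0)
lemma pvFmodModEq (m a : Int) : Int.ModEq m (PySem.Int.mod a m) a := by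
  rw [Int.modEq_iff_dvd]
  exact ⟨a.fdiv m, by rw [PySem.Int.mod, Int.fmod_def]; ring⟩

lemma pvFmodCongr {m a b : Int} (h : Int.ModEq m a b) : PySem.Int.mod a m = PySem.Int.mod b m := by
  obtain ⟨t, ht⟩ := h.dvd
  have hb : b = a + m * t := by linarith
  rw [hb, PySem.Int.mod, PySem.Int.mod, Int.add_mul_fmod_self_left]

-- ===== A-side =====
def pvPow (k : Nat) : (Int × Int) × (Int × Int) :=
  ((pvU (k+1), pvU k), (pvU k, pvU (k+1) - 2 * pvU k))

def pvMul (A B : (Int × Int) × (Int × Int)) : (Int × Int) × (Int × Int) :=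
  ((A.1.1 * B.1.1 + A.1.2 * B.2.1, A.1.1 * B.1.2 + A.1.2 * B.2.2),
   (A.2.1 * B.1.1 + A.2.2 * B.2.1, A.2.1 * B.1.2 + A.2.2 * B.2.2))

def pvMEq (m : Int) (A B : (Int × Int) × (Int × Int)) : Prop :=
  Int.ModEq m A.1.1 B.1.1 ∧ Int.ModEq m A.1.2 B.1.2 ∧ Int.ModEq m A.2.1 B.2.1 ∧ Int.ModEq m A.2.2 B.2.2

lemma pvMM_cong {m : Int} {A A' B B' : (Int × Int) × (Int × Int)}
    (hA : pvMEq m A A') (hB : pvMEq m B B') : pvMEq m (pvMM m A B) (pvMul A' B') := by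
  obtain ⟨a1, a2, a3, a4⟩ := hA
  obtain ⟨b1, b2, b3, b4⟩ := hB
  exact ⟨(pvFmodModEq _ _).trans ((a1.mul b1).add (a2.mul b3)),
         (pvFmodModEq _ _).trans ((a1.mul b2).add (a2.mul b4)),
         (pvFmodModEq _ _).trans ((a3.mul b1).add (a4.mul b3)),
         (pvFmodModEq _ _).trans ((a3.mul b2).add (a4.mul b4))⟩

lemma pvPow_mul (j k : Nat) : pvMul (pvPow j) (pvPow k) = pvPow (j+k) := by
  have h1 := pvU_add k j
  rw [show j+1+k = j+k+1 by omega] at h1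
  have h2 := pvU_add2 j k
  simp only [pvPow, pvMul, Prod.mk.injEq]
  refine ⟨⟨h1.symm, by linear_combination -h2⟩, by linear_combination -h2,
          by linear_combination -h1 + 2*h2⟩

lemma pvALoop_inv {m : Int} : ∀ e : Nat, ∀ R B r b,
    pvMEq m R (pvPow r) → pvMEq m B (pvPow b) →
    pvMEq m (pvALoop m e R B) (pvPow (r + e * b)) := by
  intro e
  induction e using Nat.strong_induction_on with
  | _ e ih =>
    intro R B r b hR hB
    match e with
    | 0 => simpa [pvALoop] using hR
    | (e+1) =>
      rw [pvALoop]
      have hBB : pvMEq m (pvMM m B B) (pvPow (b+b)) := by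
        have := pvMM_cong hB hB
        rwa [pvPow_mul] at this
      by_cases hodd : (e+1) % 2 = 1
      · have hRB : pvMEq m (pvMM m R B) (pvPow (r+b)) := by
          have := pvMM_cong hR hB
          rwa [pvPow_mul] at this
        have h := ih ((e+1)/2) (by omega) _ _ (r+b) (b+b) hRB hBB
        have harith : (r+b) + (e+1)/2 * (b+b) = r + (e+1) * b := by
          obtain ⟨q, hq⟩ : ∃ q, q = (e+1)/2 := ⟨_, rfl⟩
          rw [← hq]
          have he : e+1 = 2*q+1 := by omega
          rw [he]; ring
        rw [if_pos hodd]
        rwa [harith] at h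
      · have h := ih ((e+1)/2) (by omega) _ _ r (b+b) hR hBB
        have harith : r + (e+1)/2 * (b+b) = r + (e+1) * b := by
          obtain ⟨q, hq⟩ : ∃ q, q = (e+1)/2 := ⟨_, rfl⟩
          rw [← hq]
          have he : e+1 = 2*q := by omega
          rw [he]; ring
        rw [if_neg hodd]
        rwa [harith] at h

lemma pvA_pos {m : Int} (k : Nat) :
    PySem.Int.mod ((pvALoop m k ((1,0),(0,1)) ((2,1),(1,0))).1.1 + (pvALoop m k ((1,0),(0,1)) ((2,1),(1,0))).2.2) m
      = PySem.Int.mod (pvV k) m := by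
  have h0 : pvMEq m ((1,0),(0,1)) (pvPow 0) := by
    have : pvPow 0 = ((1,0),(0,1)) := by norm_num [pvPow, pvU]
    rw [this]; exact ⟨Int.ModEq.refl _, Int.ModEq.refl _, Int.ModEq.refl _, Int.ModEq.refl _⟩
  have h1 : pvMEq m ((2,1),(1,0)) (pvPow 1) := by
    have : pvPow 1 = ((2,1),(1,0)) := by norm_num [pvPow, pvU]
    rw [this]; exact ⟨Int.ModEq.refl _, Int.ModEq.refl _, Int.ModEq.refl _, Int.ModEq.refl _⟩
  have h := pvALoop_inv k _ _ 0 1 h0 h1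
  rw [show 0 + k * 1 = k by omega] at h
  have htr := pvFmodCongr (h.1.add h.2.2.2)
  rw [htr, show (pvPow k).1.1 + (pvPow k).2.2 = pvV k by simp [pvPow, pvV]; ring]

-- ===== B-side =====
def pvState (m : Int) (k : Nat) : Int × Int × Int :=
  (PySem.Int.mod (pvV k) m, PySem.Int.mod (pvV (k+1)) m, (-1 : Int)^k)

lemma pvBStep_state {m : Int} (k : Nat) (d : Nat) (hd : d ≤ 1) :
    pvBStep m (pvState m k) d = pvState m (2*k + d) := by
  have c1 : PySem.Int.mod (PySem.Int.mod (pvV k) m * PySem.Int.mod (pvV k) m - 2 * (-1)^k) m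
      = PySem.Int.mod (pvV (2*k)) m := by
    rw [pvFmodCongr (((pvFmodModEq m (pvV k)).mul (pvFmodModEq m (pvV k))).sub
        (Int.ModEq.refl (2 * (-1)^k))), ← pvV_double]
  have c2 : PySem.Int.mod (PySem.Int.mod (pvV k) m * PySem.Int.mod (pvV (k+1)) m - 2 * (-1)^k) m
      = PySem.Int.mod (pvV (2*k+1)) m := by
    rw [pvFmodCongr (((pvFmodModEq m (pvV k)).mul (pvFmodModEq m (pvV (k+1)))).sub
        (Int.ModEq.refl (2 * (-1)^k))), ← pvV_double1]
  have c3 : PySem.Int.mod (PySem.Int.mod (pvV (k+1)) m * PySem.Int.mod (pvV (k+1)) m + 2 * (-1)^k) m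
      = PySem.Int.mod (pvV (2*k+2)) m := by
    rw [pvFmodCongr (((pvFmodModEq m (pvV (k+1))).mul (pvFmodModEq m (pvV (k+1)))).add
        (Int.ModEq.refl (2 * (-1)^k))), ← pvV_double2]
  interval_cases d
  · simp only [pvBStep, pvState, Nat.add_zero, reduceIte, Prod.mk.injEq]
    refine ⟨c1, c2, ?_⟩
    rw [pow_mul]; norm_num
  · simp only [pvBStep, pvState, if_neg Nat.one_ne_zero, Prod.mk.injEq]
    refine ⟨c2, ?_, ?_⟩
    · rw [show 2*k+1+1 = 2*k+2 by omega]; exact c3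
    · rw [pow_succ, pow_mul]; norm_num

lemma pvBits_le_one : ∀ j : Nat, ∀ d ∈ pvBits j, d ≤ 1 := by
  intro j
  induction j using Nat.strong_induction_on with
  | _ j ih =>
    match j with
    | 0 => intro d hd; simp [pvBits] at hd
    | (j+1) =>
      intro d hd
      rw [pvBits] at hd
      rcases List.mem_cons.mp hd with h | h
      · omega
      · exact ih ((j+1)/2) (by omega) d h

lemma pvBFold {m : Int} : ∀ (L : List Nat) (k : Nat), (∀ d ∈ L, d ≤ 1) →
    L.foldl (pvBStep m) (pvState m k) = pvState m (L.foldl (fun acc d => 2*acc + d) k) := by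
  intro L
  induction L with
  | nil => intro k _; rfl
  | cons d L ih =>
    intro k h
    rw [List.foldl_cons, pvBStep_state k d (h d List.mem_cons_self), List.foldl_cons]
    exact ih (2*k + d) (fun x hx => h x (List.mem_cons_of_mem d hx))

lemma pvBitsVal : ∀ j k : Nat, ((pvBits j).reverse).foldl (fun acc d => 2*acc + d) k
    = k * 2 ^ (pvBits j).length + j := by
  intro j
  induction j using Nat.strong_induction_on with
  | _ j ih =>
    match j with
    | 0 => intro k; simp [pvBits]
    | (j+1) =>
      intro k
      rw [pvBits, List.reverse_cons, List.foldl_append, ih ((j+1)/2) (by omega) k,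
          List.length_cons, pow_succ]
      simp only [List.foldl_cons, List.foldl_nil]
      set c := 2 ^ (pvBits ((j+1)/2)).length with hc
      obtain ⟨q, hq⟩ : ∃ q, q = (j+1)/2 := ⟨_, rfl⟩
      obtain ⟨r, hr⟩ : ∃ r, r = (j+1)%2 := ⟨_, rfl⟩
      rw [← hq, ← hr, show (j+1) = 2*q+r by omega, show k*(c*2) = 2*(k*c) by ring]
      ring

lemma pvB_pos {m : Int} (j : Nat) :
    (((pvBits j).reverse).foldl (pvBStep m) (PySem.Int.mod 2 m, PySem.Int.mod 2 m, 1)).1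
      = PySem.Int.mod (pvV j) m := by
  have h0 : (PySem.Int.mod 2 m, PySem.Int.mod 2 m, (1:Int)) = pvState m 0 := by
    norm_num [pvState, pvV, pvU]
  have hb : ∀ d ∈ (pvBits j).reverse, d ≤ 1 :=
    fun d hd => pvBits_le_one j d (List.mem_reverse.mp hd)
  rw [h0, pvBFold _ 0 hb, pvBitsVal j 0,
      show 0 * 2 ^ (pvBits j).length + j = j by omega]
  rfl

-- ===== VERDICT (by name: the statement is the Claim_ definition above) =====
theorem V_mod_spec : Claim_equal_V_mod := by
  intro n m _ _
  unfold Spec_V_mod V_mod V_mod_alt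
  by_cases hm1 : m = 1
  · simp [hm1]
  · rw [if_neg hm1, if_neg hm1]
    by_cases h0 : n = 0
    · rw [if_pos h0, if_pos (show n ≤ 0 by omega)]
    · rw [if_neg h0]
      by_cases hneg : n ≤ 0
      · rw [if_pos hneg]
        have ht : n.toNat = 0 := by omega
        show PySem.Int.mod ((pvALoop m n.toNat ((1,0),(0,1)) ((2,1),(1,0))).1.1
              + (pvALoop m n.toNat ((1,0),(0,1)) ((2,1),(1,0))).2.2) m = PySem.Int.mod 2 m
        rw [ht]
        norm_num [pvALoop]
      · rw [if_neg hneg]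
        exact (pvA_pos n.toNat).trans (pvB_pos n.toNat).symm
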